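-- pv_equiv track=rewrite | github.com/RiddhiBagkar/DatastructureProblem | elementclosest.py | elementclosest
-- ===== SOURCE A (Python) =====
-- def elementclosest(Array,item):
--     smallest_closest=-1
--     largest_closest=-1
--     for i in range (len(Array)):
--         if Array[i] <= item:
--             smallest_closest=Array[i]
--
--         if item <= Array[i] <max(Array):
--             largest_closest=Array[i]
--
--
--     return (f"smallest than {item} :- {smallest_closest} \njust largest than {item}:- {largest_closest}")
-- ===== SOURCE B (Python) =====
-- def elementclosest(Array, item):
--     smallest_closest = -1
--     largest_closest = -1
--     found_small = False
--     found_large = False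
--     for x in reversed(Array):
--         if not found_small and x <= item:
--             smallest_closest = x
--             found_small = True
--         if not found_large and item <= x < max(Array):
--             largest_closest = x
--             found_large = True
--         if found_small and found_large:
--             break
--     return (f"smallest than {item} :- {smallest_closest} \njust largest than {item}:- {largest_closest}")
-- ===== Notes on version B (the rewrite author's own statement) =====
-- stated objective: alternative
-- what changed: B scans the array backwards with found-flags and an early break (first match from the end instead of A's forward pass that overwrites to keep the last match), guarding max() so it is only evaluated inside the loop.
import Mathlib
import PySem

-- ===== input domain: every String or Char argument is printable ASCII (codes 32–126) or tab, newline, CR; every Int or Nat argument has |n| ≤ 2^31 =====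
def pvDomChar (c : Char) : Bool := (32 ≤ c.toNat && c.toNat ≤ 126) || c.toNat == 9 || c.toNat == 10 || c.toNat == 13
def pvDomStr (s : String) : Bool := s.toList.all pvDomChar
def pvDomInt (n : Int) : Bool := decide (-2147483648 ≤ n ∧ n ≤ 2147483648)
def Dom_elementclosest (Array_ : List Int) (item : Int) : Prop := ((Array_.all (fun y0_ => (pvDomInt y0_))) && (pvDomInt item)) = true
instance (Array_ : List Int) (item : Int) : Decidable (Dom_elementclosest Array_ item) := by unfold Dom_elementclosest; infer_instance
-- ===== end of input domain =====

-- B scans the array from the end with found-flags and an early break instead of A's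
-- forward overwrite pass; same return string, equivalence proved on all inputs.

-- ===== PORT A =====
def elementclosest (Array_ : List Int) (item : Int) : String :=
  let st := (PySem.List.pyRange 0 (Array_.length : Int) 1).foldl
    (fun (st : Int × Int) i =>
      let x := PySem.List.pyGetD Array_ i 0
      ( if x ≤ item then x else st.1,
        if item ≤ x ∧ x < (PySem.List.max? Array_ (fun y => y)).getD 0 then x else st.2))
    (-1, -1)
  "smallest than " ++ PySem.Int.toStr item ++ " :- " ++ PySem.Int.toStr st.1 ++
    " \njust largest than " ++ PySem.Int.toStr item ++ ":- " ++ PySem.Int.toStr st.2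

-- ===== PORT B =====
-- backward scan with found-flags and early break (Source B's loop over reversed(Array))
def ecAltLoop (m item : Int) : List Int → Int × Bool → Int × Bool → Int × Int
  | [], (s, _), (l, _) => (s, l)
  | x :: rest, (s, fs), (l, fl) =>
    let sp : Int × Bool := if !fs && decide (x ≤ item) then (x, true) else (s, fs)
    let lp : Int × Bool := if !fl && (decide (item ≤ x) && decide (x < m)) then (x, true) else (l, fl)
    if sp.2 && lp.2 then (sp.1, lp.1) else ecAltLoop m item rest sp lp

def elementclosest_alt (Array_ : List Int) (item : Int) : String :=
  let m := (PySem.List.max? Array_ (fun y => y)).getD 0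
  let st := ecAltLoop m item Array_.reverse (-1, false) (-1, false)
  "smallest than " ++ PySem.Int.toStr item ++ " :- " ++ PySem.Int.toStr st.1 ++
    " \njust largest than " ++ PySem.Int.toStr item ++ ":- " ++ PySem.Int.toStr st.2

-- ===== PRECONDITION & SPEC =====
def Spec_elementclosest (Array_ : List Int) (item : Int) (out : String) : Prop := out = elementclosest_alt Array_ item
instance (Array_ : List Int) (item : Int) (out : String) : Decidable (Spec_elementclosest Array_ item out) := by unfold Spec_elementclosest; infer_instance

-- ===== CLAIM (what is proved, stated in full; the proofs are below) =====
def Claim_equal_elementclosest : Prop := ∀ (Array_ : List Int) (item : Int), Dom_elementclosest Array_ item → Spec_elementclosest Array_ item (elementclosest Array_ item)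

-- ===== LEMMAS AND PROOFS =====

-- B's loop returns, for each not-yet-found component, the first match in ys (default kept).
theorem ecAltLoop_spec (m item : Int) (ys : List Int) (s l : Int) (fs fl : Bool) :
    ecAltLoop m item ys (s, fs) (l, fl)
      = ((if fs then s else (ys.find? (fun x => decide (x ≤ item))).getD s),
         (if fl then l else (ys.find? (fun x => decide (item ≤ x) && decide (x < m))).getD l)) := by
  induction ys generalizing s l fs fl with
  | nil => cases fs <;> cases fl <;> simp [ecAltLoop]
  | cons x rest ih =>
    simp only [ecAltLoop, List.find?]
    cases fs <;> cases fl <;>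
      by_cases h1 : x ≤ item <;> by_cases h2 : item ≤ x <;> by_cases h3 : x < m <;>
      simp [h1, h2, h3, ih]

-- A's forward overwrite fold keeps the LAST match = first match of the reversed list.
theorem ecFoldA_spec (m item : Int) (l : List Int) (s0 l0 : Int) :
    l.foldl (fun (st : Int × Int) x =>
        (if x ≤ item then x else st.1, if item ≤ x ∧ x < m then x else st.2)) (s0, l0)
      = ((l.reverse.find? (fun x => decide (x ≤ item))).getD s0,
         (l.reverse.find? (fun x => decide (item ≤ x) && decide (x < m))).getD l0) := by
  induction l using List.reverseRecOn generalizing s0 l0 with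
  | nil => simp
  | append_singleton t x ih =>
    rw [List.foldl_append]
    simp only [List.foldl_cons, List.foldl_nil, List.reverse_append, List.reverse_singleton,
      List.singleton_append, List.find?]
    by_cases h1 : x ≤ item <;> by_cases h2 : item ≤ x <;> by_cases h3 : x < m <;>
      simp [h1, h2, h3, ih]

theorem ec_tuple_eq (Array_ : List Int) (item : Int) :
    (PySem.List.pyRange 0 (Array_.length : Int) 1).foldl
      (fun (st : Int × Int) i =>
        let x := PySem.List.pyGetD Array_ i 0
        ( if x ≤ item then x else st.1,
          if item ≤ x ∧ x < (PySem.List.max? Array_ (fun y => y)).getD 0 then x else st.2))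
      (-1, -1)
    = ecAltLoop ((PySem.List.max? Array_ (fun y => y)).getD 0) item Array_.reverse
        (-1, false) (-1, false) := by
  set m := (PySem.List.max? Array_ (fun y => y)).getD 0 with hm
  rw [PySem.List.foldl_pyRange_zero_pyGetD' Array_ 0
      (fun (st : Int × Int) x =>
        (if x ≤ item then x else st.1, if item ≤ x ∧ x < m then x else st.2)) (-1, -1)]
  rw [ecFoldA_spec, ecAltLoop_spec]
  simp

-- ===== VERDICT (by name: the statement is the Claim_ definition above) =====
theorem elementclosest_spec : Claim_equal_elementclosest := by
  intro Array_ item _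
  unfold Spec_elementclosest elementclosest elementclosest_alt
  rw [ec_tuple_eq]
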